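-- pv_equiv track=rewrite | github.com/harshil1903/leetcode | String/Ex_1880/check_word_equals_sum_of_two_words.py | isSumEqual2
-- ===== SOURCE A (Python) =====
-- def isSumEqual2(firstWord: str, secondWord: str, targetWord: str) -> bool:
--     # ord('a') = 97
--
--     first, second, third = 0, 0, 0
--     length = len(firstWord)
--
--     for i in firstWord:
--         length -= 1
--         first = first + ((ord(i) - 97) * 10 ** length)
--
--     length = len(secondWord)
--
--     for i in secondWord:
--         length -= 1
--         second = second + ((ord(i) - 97) * 10 ** length)
--
--     length = len(targetWord)
--
--     for i in targetWord:
--         length -= 1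
--         third = third + ((ord(i) - 97) * 10 ** length)
--
--     return first + second == third
-- ===== SOURCE B (Python) =====
-- def isSumEqual2(firstWord: str, secondWord: str, targetWord: str) -> bool:
--     # Verify first + second == target by schoolbook addition from the right,
--     # one digit column at a time with a carry; no big integers are built.
--     # Correct for arbitrary "digits" d = ord(c) - 97 (even negative or > 9):
--     # sum(r_i * 10**i) == 0 iff every column sum (carry + r_i) is divisible
--     # by 10 and the final carry is 0.
--     i, j, k = len(firstWord) - 1, len(secondWord) - 1, len(targetWord) - 1
--     carry = 0
--     while i >= 0 or j >= 0 or k >= 0: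
--         m = carry
--         if i >= 0:
--             m += ord(firstWord[i]) - 97
--             i -= 1
--         if j >= 0:
--             m += ord(secondWord[j]) - 97
--             j -= 1
--         if k >= 0:
--             m -= ord(targetWord[k]) - 97
--             k -= 1
--         if m % 10 != 0:
--             return False
--         carry = m // 10
--     return carry == 0
-- ===== Notes on version B (the rewrite author's own statement) =====
-- stated objective: faster
-- what changed: Instead of building three arbitrary-precision integers with per-character 10**length weights and comparing their sum (A), B verifies the equation by schoolbook column addition from the right: one pass over the three words in parallel with a small carry, requiring each column sum (carry + d_first + d_second - d_target) to be divisible by 10 and the final carry to be 0; no big integers are ever constructed.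
import Mathlib
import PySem

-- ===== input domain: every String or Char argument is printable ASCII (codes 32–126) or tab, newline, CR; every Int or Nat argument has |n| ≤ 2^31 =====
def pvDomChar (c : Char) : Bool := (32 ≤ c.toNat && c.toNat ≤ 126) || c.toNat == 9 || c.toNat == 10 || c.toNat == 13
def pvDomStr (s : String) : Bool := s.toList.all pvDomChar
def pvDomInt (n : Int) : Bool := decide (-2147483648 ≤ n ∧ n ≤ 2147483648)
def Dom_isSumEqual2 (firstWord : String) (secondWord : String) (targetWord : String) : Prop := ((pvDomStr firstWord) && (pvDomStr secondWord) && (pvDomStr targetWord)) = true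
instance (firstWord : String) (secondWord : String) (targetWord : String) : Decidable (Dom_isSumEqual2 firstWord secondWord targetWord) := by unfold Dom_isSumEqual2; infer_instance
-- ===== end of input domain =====

-- B verifies first+second==target by schoolbook column addition from the right with a carry,
-- never building the three big integers A builds; objective: faster (measured).

-- ===== PORT A =====
-- A's loop state: (length, acc); each step does length -= 1 then acc += (ord(i)-97)*10**length.
-- The exponent `length` is never negative in A, so `.toNat` on it is exact here.
def pvStepA (st : Int × Int) (c : Char) : Int × Int :=
  (st.1 - 1, st.2 + ((c.toNat : Int) - 97) * 10 ^ (st.1 - 1).toNat)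

def isSumEqual2 (firstWord : String) (secondWord : String) (targetWord : String) : Bool :=
  let first := (firstWord.toList.foldl pvStepA ((firstWord.toList.length : Int), 0)).2
  let second := (secondWord.toList.foldl pvStepA ((secondWord.toList.length : Int), 0)).2
  let third := (targetWord.toList.foldl pvStepA ((targetWord.toList.length : Int), 0)).2
  first + second == third

-- ===== PORT B =====
-- `word[i]` for the current right-to-left index, 0 once the word is exhausted
-- (the corresponding `if i >= 0` branch of Source B's loop body).
def pvDigit : List Char → Int
  | [] => 0
  | c :: _ => (c.toNat : Int) - 97

-- Source B's while loop over the three reversed words: one digit column per step,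
-- `m % 10` and `m // 10` are Python's floor mod/div (PySem.Int.mod / floordiv).
def pvColumns (fs ss ts : List Char) (carry : Int) : Bool :=
  if fs = [] ∧ ss = [] ∧ ts = [] then carry == 0
  else
    let m := carry + pvDigit fs + pvDigit ss - pvDigit ts
    if PySem.Int.mod m 10 ≠ 0 then false
    else pvColumns fs.tail ss.tail ts.tail (PySem.Int.floordiv m 10)
termination_by fs.length + ss.length + ts.length
decreasing_by
  rcases fs with _ | ⟨a, fs⟩ <;> rcases ss with _ | ⟨b, ss⟩ <;> rcases ts with _ | ⟨c, ts⟩ <;>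
    simp_all <;> omega

def isSumEqual2_alt (firstWord : String) (secondWord : String) (targetWord : String) : Bool :=
  pvColumns firstWord.toList.reverse secondWord.toList.reverse targetWord.toList.reverse 0

-- ===== PRECONDITION & SPEC =====
def Spec_isSumEqual2 (firstWord : String) (secondWord : String) (targetWord : String) (out : Bool) : Prop := out = isSumEqual2_alt firstWord secondWord targetWord
instance (firstWord : String) (secondWord : String) (targetWord : String) (out : Bool) : Decidable (Spec_isSumEqual2 firstWord secondWord targetWord out) := by unfold Spec_isSumEqual2; infer_instance

-- ===== CLAIM (what is proved, stated in full; the proofs are below) =====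
def Claim_equal_isSumEqual2 : Prop := ∀ (firstWord : String) (secondWord : String) (targetWord : String), Dom_isSumEqual2 firstWord secondWord targetWord → Spec_isSumEqual2 firstWord secondWord targetWord (isSumEqual2 firstWord secondWord targetWord)

-- ===== LEMMAS AND PROOFS =====

-- Value of a LOW-endian (reversed) digit list: Σ (ord cᵢ - 97) · 10^i.
def pvLV : List Char → Int
  | [] => 0
  | c :: tl => ((c.toNat : Int) - 97) + 10 * pvLV tl

theorem pvLV_head_tail (l : List Char) : pvLV l = pvDigit l + 10 * pvLV l.tail := by
  cases l <;> simp [pvLV, pvDigit]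

-- B's column loop decides exactly whether the carried total is zero.
theorem pvColumns_eq (fs ss ts : List Char) (carry : Int) :
    pvColumns fs ss ts carry = decide (carry + pvLV fs + pvLV ss - pvLV ts = 0) := by
  fun_induction pvColumns fs ss ts carry with
  | case1 fs ss ts carry h =>
    obtain ⟨h1, h2, h3⟩ := h
    subst h1; subst h2; subst h3
    simp only [pvLV, add_zero, sub_zero]
    by_cases hc : carry = 0 <;> simp [hc]
  | case2 fs ss ts carry h hm hcond =>
    have hmeq : hm = carry + pvDigit fs + pvDigit ss - pvDigit ts := rfl
    rw [PySem.Int.mod_eq_emod_of_pos (by norm_num)] at hcond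
    rw [pvLV_head_tail fs, pvLV_head_tail ss, pvLV_head_tail ts]
    symm
    simp only [decide_eq_false_iff_not]
    omega
  | case3 fs ss ts carry h hm hcond ih =>
    have hmeq : hm = carry + pvDigit fs + pvDigit ss - pvDigit ts := rfl
    rw [PySem.Int.mod_eq_emod_of_pos (by norm_num)] at hcond
    rw [ih, PySem.Int.floordiv_eq_ediv_of_pos (by norm_num)]
    rw [pvLV_head_tail fs, pvLV_head_tail ss, pvLV_head_tail ts]
    simp only [decide_eq_decide]
    omega

-- HIGH-endian Horner value of a word, as a proof-side characterisation of A's fold.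
def pvHorner (l : List Char) : Int :=
  l.foldl (fun num c => num * 10 + ((c.toNat : Int) - 97)) 0

theorem horner_shift (l : List Char) (acc : Int) :
    l.foldl (fun num c => num * 10 + ((c.toNat : Int) - 97)) acc
      = acc * 10 ^ l.length + pvHorner l := by
  induction l generalizing acc with
  | nil => simp [pvHorner]
  | cons c tl ih =>
    simp only [List.foldl, List.length_cons, pvHorner]
    rw [ih (acc * 10 + ((c.toNat : Int) - 97)), ih (0 * 10 + ((c.toNat : Int) - 97))]
    ring

theorem pvHorner_cons (c : Char) (tl : List Char) :
    pvHorner (c :: tl) = ((c.toNat : Int) - 97) * 10 ^ tl.length + pvHorner tl := by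
  have h : pvHorner (c :: tl)
      = tl.foldl (fun num c => num * 10 + ((c.toNat : Int) - 97)) (0 * 10 + ((c.toNat : Int) - 97)) := rfl
  rw [h, horner_shift]
  ring

-- A's positional fold, started at any length offset, equals the Horner value scaled by 10^k.
theorem foldA_eq_horner (l : List Char) (k : ℕ) (acc : Int) :
    (l.foldl pvStepA (((k + l.length : ℕ) : Int), acc)).2 = acc + 10 ^ k * pvHorner l := by
  induction l generalizing k acc with
  | nil => simp [pvHorner]
  | cons c tl ih =>
    have h1 : (((k + (c :: tl).length : ℕ) : Int) - 1) = ((k + tl.length : ℕ) : Int) := by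
      simp only [List.length_cons]; push_cast; ring
    simp only [List.foldl, pvStepA, h1, Int.toNat_natCast]
    rw [ih k, pvHorner_cons]
    ring

theorem valA_eq (w : String) :
    (w.toList.foldl pvStepA ((w.toList.length : Int), 0)).2 = pvHorner w.toList := by
  have := foldA_eq_horner w.toList 0 0
  simpa using this

theorem pvLV_append (xs : List Char) (c : Char) :
    pvLV (xs ++ [c]) = pvLV xs + ((c.toNat : Int) - 97) * 10 ^ xs.length := by
  induction xs with
  | nil => simp [pvLV]
  | cons a tl ih => simp only [List.cons_append, pvLV, ih, List.length_cons]; ring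

-- The two digit encodings agree: Horner on the word = low-endian value of its reverse.
theorem horner_eq_LV_reverse (l : List Char) : pvHorner l = pvLV l.reverse := by
  induction l with
  | nil => simp [pvHorner, pvLV]
  | cons c tl ih =>
    rw [pvHorner_cons, ih, List.reverse_cons, pvLV_append, List.length_reverse]
    ring

-- ===== VERDICT (by name: the statement is the Claim_ definition above) =====
theorem isSumEqual2_spec : Claim_equal_isSumEqual2 := by
  intro f s t _
  unfold Spec_isSumEqual2 isSumEqual2 isSumEqual2_alt
  simp only [valA_eq, pvColumns_eq, ← horner_eq_LV_reverse]
  by_cases hc : pvHorner f.toList + pvHorner s.toList = pvHorner t.toList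
  · simp [hc]
  · have h2 : pvHorner f.toList + pvHorner s.toList - pvHorner t.toList ≠ 0 := by omega
    simp [hc, h2]
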